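-- pv_equiv track=rewrite | github.com/coblan/helpers | func/collection/mylist.py | jump_fetch
-- ===== SOURCE A (Python) =====
-- def jump_fetch(ls,span=3):
--     """
--     """
--     table_fields =[]
--     length= len(ls)
--     current_index=0
--     while True:
--         if current_index >=length:
--             break
--         last_ls = [ ls[current_index] ]
--         if current_index+span < length:
--             last_ls.append(
--                 ls[current_index +span]
--             )
--         table_fields.append(last_ls)
--         if (current_index+span+1)%(2*span) ==0:
--             current_index +=(span+1)
--         else:
--             current_index +=1
--     return table_fields
-- ===== SOURCE B (Python) =====
-- def jump_fetch(ls, span=3):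
--     out = []
--     block = ls
--     while block:
--         head = block[:span]
--         partner = block[span:2 * span]
--         out += [[a, b] for a, b in zip(head, partner)]
--         out += [[a] for a in head[len(partner):]]
--         block = block[2 * span:]
--     return out
-- ===== Notes on version B (the rewrite author's own statement) =====
-- stated objective: simpler
-- what changed: Drops A's index bookkeeping (a running index bumped by 1 or span+1 via a modulus test) entirely: B consumes the list by slicing off one 2*span-chunk per iteration and builds that chunk's pairs by zipping the first half with the second half, singletons for the unzipped leftover of the first half.
import Mathlib
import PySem

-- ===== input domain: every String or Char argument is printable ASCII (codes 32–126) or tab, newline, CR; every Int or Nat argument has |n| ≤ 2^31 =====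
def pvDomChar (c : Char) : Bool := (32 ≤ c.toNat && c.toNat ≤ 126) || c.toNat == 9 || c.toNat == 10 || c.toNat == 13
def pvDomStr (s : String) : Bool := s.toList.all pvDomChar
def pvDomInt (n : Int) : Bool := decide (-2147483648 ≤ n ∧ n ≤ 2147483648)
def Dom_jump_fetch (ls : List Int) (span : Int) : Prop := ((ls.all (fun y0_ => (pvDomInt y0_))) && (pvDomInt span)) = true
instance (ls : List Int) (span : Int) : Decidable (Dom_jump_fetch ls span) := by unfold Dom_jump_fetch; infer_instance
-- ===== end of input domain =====

-- B replaces A's index-tracking while-loop (running index bumped by 1 or span+1 via a modulus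
-- test) by a loop that slices off one 2*span-chunk per iteration and zips its two halves;
-- objective: simpler. Equal return values on Pre_.

-- ===== PORT A =====
-- A's pair at index i: [ls[i]], plus ls[i+span] when i+span < len(ls) (i always in range here)
def jfPair (ls : List Int) (span : Int) (i : Int) : List Int :=
  let p := [PySem.List.pyGetD ls i 0]
  if i + span < (ls.length : Int) then p ++ [PySem.List.pyGetD ls (i + span) 0] else p

-- A's while-loop; fuel bounds the iterations (inside Pre_ the loop runs at most ls.length times)
def jfLoop (ls : List Int) (span : Int) (fuel : Nat) (ci : Int) (acc : List (List Int)) :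
    List (List Int) :=
  match fuel with
  | 0 => acc
  | f + 1 =>
    if ci ≥ (ls.length : Int) then acc
    else
      let acc' := acc ++ [jfPair ls span ci]
      if PySem.Int.mod (ci + span + 1) (2 * span) = 0 then
        jfLoop ls span f (ci + (span + 1)) acc'
      else
        jfLoop ls span f (ci + 1) acc'

def jump_fetch (ls : List Int) (span : Int) : List (List Int) :=
  jfLoop ls span (ls.length + 1) 0 []

-- ===== PORT B =====
-- B's while-loop over the remaining suffix; fuel bounds the iterations (inside Pre_ the block
-- shrinks every iteration, so ls.length + 1 always suffices)
def jbLoop (span : Int) (fuel : Nat) (block : List Int) (out : List (List Int)) :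
    List (List Int) :=
  match fuel with
  | 0 => out
  | f + 1 =>
    if block = [] then out
    else
      let head := PySem.List.slice block none (some span)
      let partner := PySem.List.slice block (some span) (some (2 * span))
      let out' := out ++ List.zipWith (fun a b => [a, b]) head partner
        ++ (PySem.List.slice head (some (partner.length : Int)) none).map (fun a => [a])
      jbLoop span f (PySem.List.slice block (some (2 * span)) none) out'

def jump_fetch_alt (ls : List Int) (span : Int) : List (List Int) :=
  jbLoop span (ls.length + 1) ls []

-- ===== PRECONDITION & SPEC =====
-- Pre_ excludes nonpositive span with a nonempty list, where A never returns (ZeroDivisionError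
-- for span = 0, an infinite loop for negative span); it admits every input A returns on.
def Pre_jump_fetch (ls : List Int) (span : Int) : Prop := 1 ≤ span ∨ ls = []
instance (ls : List Int) (span : Int) : Decidable (Pre_jump_fetch ls span) := by
  unfold Pre_jump_fetch; infer_instance
def pvWitness_jump_fetch : List Int × Int := ([5, 1, 4, 1, 5, 9, 2, 6], 2)

def Spec_jump_fetch (ls : List Int) (span : Int) (out : List (List Int)) : Prop :=
  out = jump_fetch_alt ls span
instance (ls : List Int) (span : Int) (out : List (List Int)) :
    Decidable (Spec_jump_fetch ls span out) := by unfold Spec_jump_fetch; infer_instance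

-- ===== CLAIM (what is proved, stated in full; the proofs are below) =====
def Claim_equal_jump_fetch : Prop := ∀ (ls : List Int) (span : Int), Dom_jump_fetch ls span →
  Pre_jump_fetch ls span → Spec_jump_fetch ls span (jump_fetch ls span)

-- ===== LEMMAS AND PROOFS =====

-- the common value, written as a flatMap over the block starts from b upward
def jfTail (ls : List Int) (span : Int) (b : Int) : List (List Int) :=
  (PySem.List.pyRange b (ls.length : Int) (2 * span)).flatMap
    (fun base => (PySem.List.pyRange base (min (base + span) (ls.length : Int)) 1).map
      (jfPair ls span))

theorem pyRange_cons_of_pos {st : Int} (a b : Int) (hst : 0 < st) (hab : a < b) :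
    PySem.List.pyRange a b st = a :: PySem.List.pyRange (a + st) b st := by
  have hx : 0 ≤ b - a - 1 := by omega
  rw [PySem.List.pyRange_of_pos _ _ hst, PySem.List.pyRange_of_pos _ _ hst, if_pos hab]
  have h2 : (b - a + st - 1) / st = (b - (a + st) + st - 1) / st + 1 := by
    have h := Int.add_mul_ediv_right (b - a - 1) 1 (show st ≠ 0 by omega)
    rw [one_mul] at h
    have e1 : b - a + st - 1 = b - a - 1 + st := by ring
    have e2 : b - (a + st) + st - 1 = b - a - 1 := by ring
    rw [e1, e2, h]
  have h3 : 0 ≤ (b - (a + st) + st - 1) / st := by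
    have e2 : b - (a + st) + st - 1 = b - a - 1 := by ring
    rw [e2]; exact Int.ediv_nonneg hx (by omega)
  have h1 : ((b - a + st - 1) / st).toNat = ((b - (a + st) + st - 1) / st).toNat + 1 := by
    omega
  rw [h1, List.range_succ_eq_map, List.map_cons]
  simp only [Nat.cast_zero, mul_zero, add_zero, List.map_map]
  congr 1
  by_cases hc : a + st < b
  · rw [if_pos hc]
    apply List.map_congr_left
    intro k _
    simp only [Function.comp_apply]
    push_cast
    ring_nf
  · rw [if_neg hc]
    have e2 : b - (a + st) + st - 1 = b - a - 1 := by ring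
    have hz : (b - (a + st) + st - 1) / st = 0 := by
      rw [e2]; exact Int.ediv_eq_zero_of_lt hx (by omega)
    rw [hz]; simp

theorem pyRange_nil_of_pos {st : Int} (a b : Int) (hst : 0 < st) (hab : b ≤ a) :
    PySem.List.pyRange a b st = [] := by
  rw [PySem.List.pyRange_of_pos _ _ hst, if_neg (by omega)]; simp

theorem jfTail_nil (ls : List Int) (span b : Int) (hs : 1 ≤ span)
    (hb : (ls.length : Int) ≤ b) : jfTail ls span b = [] := by
  unfold jfTail
  rw [pyRange_nil_of_pos _ _ (by omega) hb]
  simp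

theorem jfTail_unfold (ls : List Int) (span b : Int) (hs : 1 ≤ span) :
    jfTail ls span b =
      (PySem.List.pyRange b (min (b + span) (ls.length : Int)) 1).map (jfPair ls span) ++
        jfTail ls span (b + 2 * span) := by
  unfold jfTail
  by_cases hb : b < (ls.length : Int)
  · rw [pyRange_cons_of_pos b _ (by omega) hb, List.flatMap_cons]
  · rw [pyRange_nil_of_pos b _ (by omega) (by omega),
      pyRange_nil_of_pos (b + 2 * span) _ (by omega) (by omega),
      PySem.List.pyRange_one_eq_nil (by omega)]
    simp

theorem jfMod_iff (span a r : Int) (hs : 1 ≤ span) (hr : 0 ≤ r) (hrs : r < span) :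
    PySem.Int.mod (2 * span * a + r + span + 1) (2 * span) = 0 ↔ r = span - 1 := by
  rw [PySem.Int.mod_eq_emod_of_pos (by omega)]
  have harr : 2 * span * a + r + span + 1 = r + span + 1 + 2 * span * a := by ring
  rw [harr, Int.add_mul_emod_self_left]
  constructor
  · intro h
    by_contra hne
    have hlt : r + span + 1 < 2 * span := by omega
    rw [Int.emod_eq_of_lt (by omega) hlt] at h
    omega
  · intro h
    subst h
    have : span - 1 + span + 1 = 2 * span := by ring
    rw [this, Int.emod_self]

-- A's loop invariant: entering at the r-th kept index of block a, the loop emits the rest of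
-- block a, then exactly the remaining blocks
theorem jfLoop_eq (ls : List Int) (span : Int) (hs : 1 ≤ span) :
    ∀ (fuel : Nat) (a r : Int) (acc : List (List Int)), 0 ≤ a → 0 ≤ r → r < span →
      (ls.length : Int) ≤ 2 * span * a + r + fuel →
      jfLoop ls span fuel (2 * span * a + r) acc =
        acc ++ (PySem.List.pyRange (2 * span * a + r)
            (min (2 * span * a + span) (ls.length : Int)) 1).map (jfPair ls span) ++
          jfTail ls span (2 * span * (a + 1)) := by
  intro fuel
  induction fuel with
  | zero =>
    intro a r acc ha hr hrs hfl
    simp only [jfLoop]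
    have hb : (ls.length : Int) ≤ 2 * span * (a + 1) := by
      have : 2 * span * (a + 1) = 2 * span * a + 2 * span := by ring
      omega
    rw [PySem.List.pyRange_one_eq_nil (by omega), jfTail_nil ls span _ hs hb]
    simp
  | succ f ih =>
    intro a r acc ha hr hrs hfl
    simp only [jfLoop]
    by_cases hend : 2 * span * a + r ≥ (ls.length : Int)
    · rw [if_pos hend]
      have hb : (ls.length : Int) ≤ 2 * span * (a + 1) := by
        have : 2 * span * (a + 1) = 2 * span * a + 2 * span := by ring
        omega
      rw [PySem.List.pyRange_one_eq_nil (by omega), jfTail_nil ls span _ hs hb]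
      simp
    · rw [if_neg hend]
      by_cases hjump : PySem.Int.mod (2 * span * a + r + span + 1) (2 * span) = 0
      · rw [if_pos hjump]
        have hr1 : r = span - 1 := (jfMod_iff span a r hs hr hrs).mp hjump
        subst hr1
        have hstep : 2 * span * a + (span - 1) + (span + 1) = 2 * span * (a + 1) + 0 := by ring
        rw [hstep, ih (a + 1) 0 _ (by omega) le_rfl (by omega) (by omega)]
        have hmin : min (2 * span * a + span) (ls.length : Int) = 2 * span * a + span := by
          omega
        rw [hmin]
        have hone : PySem.List.pyRange (2 * span * a + (span - 1)) (2 * span * a + span) 1 =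
            [2 * span * a + (span - 1)] := by
          have : 2 * span * a + span = (2 * span * a + (span - 1)) + 1 := by ring
          rw [this, PySem.List.pyRange_one_singleton]
        rw [hone, jfTail_unfold ls span (2 * span * (a + 1)) hs]
        have : 2 * span * (a + 1) + 0 = 2 * span * (a + 1) := by ring
        rw [this]
        have : 2 * span * (a + 1) + 2 * span = 2 * span * (a + 1 + 1) := by ring
        rw [this]
        simp [List.append_assoc]
      · rw [if_neg hjump]
        have hrne : r ≠ span - 1 := fun h => hjump ((jfMod_iff span a r hs hr hrs).mpr h)
        have hstep : 2 * span * a + r + 1 = 2 * span * a + (r + 1) := by ring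
        rw [hstep, ih a (r + 1) _ ha (by omega) (by omega) (by omega)]
        rw [pyRange_cons_of_pos (2 * span * a + r) _ one_pos (by omega)]
        have : 2 * span * a + r + 1 = 2 * span * a + (r + 1) := by ring
        rw [this, List.map_cons]
        simp [List.append_assoc]

-- B's chunk, zipped from two halves of the suffix at b, equals A's block of pairs at b
theorem jbBlock_eq (ls : List Int) (span : Int) (hs : 1 ≤ span) (b : Nat) :
    List.zipWith (fun a c => [a, c]) ((ls.drop b).take span.toNat)
        (((ls.drop b).drop span.toNat).take span.toNat) ++
      (((ls.drop b).take span.toNat).drop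
        (((ls.drop b).drop span.toNat).take span.toNat).length).map (fun a => [a]) =
    (PySem.List.pyRange (b : Int) (min ((b : Int) + span) (ls.length : Int)) 1).map
      (jfPair ls span) := by
  have hsp : ((span.toNat : Int)) = span := by omega
  set n := ls.length with hn
  set s := span.toNat with hsdef
  apply List.ext_getElem
  · simp only [List.length_append, List.length_zipWith, List.length_map, List.length_drop,
      List.length_take, PySem.List.length_pyRange_one]
    omega
  · intro i h1 h2
    have hi : i < min s (n - b) := by
      simp only [List.length_append, List.length_zipWith, List.length_map, List.length_drop,
        List.length_take] at h1
      omega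
    have hbn : b + i < n := by omega
    have his : i < s := by omega
    rw [List.getElem_map, PySem.List.getElem_pyRange_one]
    have hq : (List.zipWith (fun a c => [a, c]) ((ls.drop b).take s)
        (((ls.drop b).drop s).take s)).length = min s (n - b - s) := by
      simp only [List.length_zipWith, List.length_take, List.length_drop]
      omega
    unfold jfPair
    by_cases hc : b + i + s < n
    · have hiq : i < min s (n - b - s) := by omega
      rw [List.getElem_append_left (by omega)]
      rw [List.getElem_zipWith]
      have hcond : ((b : Int) + i) + span < (n : Int) := by omega
      rw [if_pos hcond]
      have e1 : ((ls.drop b).take s)[i]'(by simp; omega) = ls[b + i]'hbn := by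
        rw [List.getElem_take, List.getElem_drop]
      have e2 : (((ls.drop b).drop s).take s)[i]'(by simp; omega) = ls[b + (s + i)]'(by omega) := by
        rw [List.getElem_take, List.getElem_drop, List.getElem_drop]
      rw [e1, e2]
      rw [PySem.List.pyGetD_eq_getElem ls (i := (b : Int) + i) 0 (by omega) (by omega),
        PySem.List.pyGetD_eq_getElem ls (i := (b : Int) + i + span) 0 (by omega)
          (by omega)]
      simp only [List.singleton_append]
      have t1 : ((b : Int) + i).toNat = b + i := by omega
      have t2 : ((b : Int) + i + span).toNat = b + (s + i) := by omega
      simp only [t1, t2]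
    · have hcond : ¬ (((b : Int) + i) + span < (n : Int)) := by omega
      rw [if_neg hcond]
      rw [List.getElem_append_right (by omega)]
      rw [List.getElem_map, List.getElem_drop, List.getElem_take, List.getElem_drop]
      rw [PySem.List.pyGetD_eq_getElem ls (i := (b : Int) + i) 0 (by omega) (by omega)]
      have t1 : ((b : Int) + i).toNat = b + i := by omega
      have hp : ((((ls.drop b).drop s).take s)).length = min s (n - b - s) := by
        simp only [List.length_take, List.length_drop]; omega
      have t3 : (((ls.drop b).drop s).take s).length +
          (i - (List.zipWith (fun a c => [a, c]) ((ls.drop b).take s)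
            (((ls.drop b).drop s).take s)).length) = i := by
        rw [hq, hp]; omega
      simp only [t1, t3]

-- B's loop invariant: running on the suffix at b, it appends exactly the remaining blocks
theorem jbLoop_eq (ls : List Int) (span : Int) (hs : 1 ≤ span) :
    ∀ (fuel : Nat) (b : Nat) (out : List (List Int)), ls.length - b ≤ fuel →
      jbLoop span fuel (ls.drop b) out = out ++ jfTail ls span (b : Int) := by
  intro fuel
  induction fuel with
  | zero =>
    intro b out hfl
    have hb : ls.length ≤ b := by omega
    simp only [jbLoop]
    rw [jfTail_nil ls span _ hs (by omega), List.append_nil]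
  | succ f ih =>
    intro b out hfl
    simp only [jbLoop]
    by_cases hnil : ls.drop b = []
    · rw [if_pos hnil]
      have hb : ls.length ≤ b := by
        have := List.drop_eq_nil_iff.mp hnil; omega
      rw [jfTail_nil ls span _ hs (by omega), List.append_nil]
    · rw [if_neg hnil]
      have hbn : b < ls.length := by
        by_contra hcon
        exact hnil (List.drop_eq_nil_iff.mpr (by omega))
      have h2s : (2 * span).toNat = span.toNat + span.toNat := by omega
      have hslice1 : PySem.List.slice (ls.drop b) none (some span) =
          (ls.drop b).take span.toNat := PySem.List.slice_to _ (by omega)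
      have hslice2 : PySem.List.slice (ls.drop b) (some span) (some (2 * span)) =
          ((ls.drop b).drop span.toNat).take span.toNat := by
        rw [PySem.List.slice_toNat _ (by omega) (by omega)]
        congr 1
        omega
      have hslice3 : PySem.List.slice (ls.drop b) (some (2 * span)) none =
          ls.drop (b + (2 * span).toNat) := by
        rw [PySem.List.slice_from _ (by omega), List.drop_drop]
      have hslice4 : ∀ (h : List Int) (m : Nat),
          PySem.List.slice h (some ((m : Nat) : Int)) none = h.drop m := fun h m =>
        PySem.List.slice_from_natCast h m
      simp only [hslice1, hslice2, hslice3]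
      rw [hslice4]
      rw [ih (b + (2 * span).toNat) _ (by omega)]
      have hcast : ((b + (2 * span).toNat : Nat) : Int) = (b : Int) + 2 * span := by
        push_cast; omega
      rw [hcast]
      conv_rhs => rw [jfTail_unfold ls span (b : Int) hs, ← jbBlock_eq ls span hs b]
      simp [List.append_assoc]

-- ===== VERDICT (by name: the statement is the Claim_ definition above) =====
theorem jump_fetch_spec : Claim_equal_jump_fetch := by
  intro ls span _ hpre
  unfold Spec_jump_fetch
  rcases hpre with hs | hnil
  · have hB : jump_fetch_alt ls span = jfTail ls span 0 := by
      unfold jump_fetch_alt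
      have := jbLoop_eq ls span hs (ls.length + 1) 0 [] (by omega)
      simpa using this
    have hA := jfLoop_eq ls span hs (ls.length + 1) 0 0 [] le_rfl le_rfl (by omega)
      (by omega)
    simp only [mul_zero, add_zero, zero_add, List.nil_append] at hA
    rw [jump_fetch, hA, hB, jfTail_unfold ls span 0 hs]
    norm_num
  · subst hnil
    simp [jump_fetch, jfLoop, jump_fetch_alt, jbLoop]
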